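-- pv_equiv track=rewrite | github.com/HAizelf/CO | Simple-Assembler/error_updated.py | check_valid_variable
-- ===== SOURCE A (Python) =====
-- type_A={"add":"00000","sub": "00001","mul":"00110","xor":"01010","or":"01011","and":"01100"}
--
-- type_B={"mov" : "00010","rs":"01000","ls":"01001" }   #typeB contains $Imm value
--
-- type_C={"mov": "00011","div":"00111","not":"01101","cmp":"01110"}
--
-- type_D={"ld":"00100","st":"00101"}
--
-- type_E={"jmp":"01111","jlt":"10000","jgt":"10001","je":"10010"}
--
-- def check_type(x):
--     #returns the type of instruction
--     if x:
--         first=x[0]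
--         m=""
--         for i in x:
--             m=m+i
--
--         if first in type_A.keys():
--             return "A"
--         elif first in type_B.keys() and ("$" in m):
--             return "B"
--         elif first in type_C.keys():
--             return "C"
--         elif first in type_D.keys():
--             return "D"
--         elif first in type_E.keys():
--             return "E"
--         elif first=="hlt":
--             return "F"
--         elif ":" in first:
--             return "label"
--         elif "var" ==first:
--             return "variable"
--         else:
--             return "none"
--     else:
--         return "none"
--
-- def check_valid_variable(line): #check if its valid variable
--     type=check_type(line)
--     if type=="label":
--         a=check_valid_variable(line[1:])
--         return a
--     if type=="variable":
--         if len(line)>=2: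
--             if not(line[1].isalnum()):
--                 return True
--         else:
--             return False
--
--     return False
-- ===== SOURCE B (Python) =====
-- def _instr_type(x):
--     # same classification as A's check_type, with the concatenation "$" test
--     # replaced by an any() over tokens and the type dicts by plain tuples
--     if not x:
--         return "none"
--     first = x[0]
--     if first in ("add", "sub", "mul", "xor", "or", "and"):
--         return "A"
--     if first in ("mov", "rs", "ls") and any("$" in tok for tok in x):
--         return "B"
--     if first in ("mov", "div", "not", "cmp"):
--         return "C"
--     if first in ("ld", "st"):
--         return "D"
--     if first in ("jmp", "jlt", "jgt", "je"):
--         return "E"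
--     if first == "hlt":
--         return "F"
--     if ":" in first:
--         return "label"
--     if first == "var":
--         return "variable"
--     return "none"
--
--
-- def check_valid_variable(line):
--     while _instr_type(line) == "label":
--         line = line[1:]
--     return _instr_type(line) == "variable" and len(line) >= 2 and not line[1].isalnum()
-- ===== Notes on version B (the rewrite author's own statement) =====
-- stated objective: simpler
-- what changed: Replaces A's label-stripping recursion with an iterative while loop and a single boolean conjunction, and in the type helper replaces A's character-by-character joined-string build and '$' scan with any() over tokens and the five code dicts with plain tuples.
import Mathlib
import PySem

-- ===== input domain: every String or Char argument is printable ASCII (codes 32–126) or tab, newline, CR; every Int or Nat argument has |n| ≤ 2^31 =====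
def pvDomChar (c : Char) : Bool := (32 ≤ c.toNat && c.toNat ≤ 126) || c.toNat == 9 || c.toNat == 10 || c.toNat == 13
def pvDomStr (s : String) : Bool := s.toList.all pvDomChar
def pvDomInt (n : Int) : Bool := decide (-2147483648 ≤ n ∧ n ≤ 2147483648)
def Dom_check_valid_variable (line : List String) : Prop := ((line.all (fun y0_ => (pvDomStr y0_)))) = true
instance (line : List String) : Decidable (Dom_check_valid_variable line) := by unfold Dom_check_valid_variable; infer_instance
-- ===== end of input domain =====

-- B replaces A's label-stripping recursion with an iterative strip loop and a single
-- boolean conjunction, and tests '$' with any-over-tokens instead of A's joined string.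

-- ===== PORT A =====
def type_A : PySem.Dict String String :=
  ⟨[("add","00000"),("sub","00001"),("mul","00110"),("xor","01010"),("or","01011"),("and","01100")]⟩
def type_B : PySem.Dict String String := ⟨[("mov","00010"),("rs","01000"),("ls","01001")]⟩
def type_C : PySem.Dict String String := ⟨[("mov","00011"),("div","00111"),("not","01101"),("cmp","01110")]⟩
def type_D : PySem.Dict String String := ⟨[("ld","00100"),("st","00101")]⟩
def type_E : PySem.Dict String String := ⟨[("jmp","01111"),("jlt","10000"),("jgt","10001"),("je","10010")]⟩

def check_type (x : List String) : String :=
  match x with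
  | [] => "none"
  | first :: _ =>
    -- m = m + i loop, kept as a fold over code points ('$'-membership test is exact there)
    let m : List Char := x.foldl (fun m i => m ++ i.toList) []
    if type_A.contains first then "A"
    else if type_B.contains first && PySem.Chars.isIn ['$'] m then "B"
    else if type_C.contains first then "C"
    else if type_D.contains first then "D"
    else if type_E.contains first then "E"
    else if first == "hlt" then "F"
    else if PySem.Str.isIn ":" first then "label"
    else if first == "var" then "variable"
    else "none"

def check_valid_variable (line : List String) : Bool :=
  if _h : check_type line = "label" then
    check_valid_variable (line.drop 1)
  else if check_type line = "variable" then
    if 2 ≤ line.length then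
      if !(PySem.Str.strIsalnum (line.getD 1 "")) then true else false
    else false
  else false
termination_by line.length
decreasing_by
  cases line with
  | nil => simp [check_type] at _h
  | cons a t => simp

-- ===== PORT B =====
def instrType (x : List String) : String :=
  match x with
  | [] => "none"
  | first :: _ =>
    if (["add","sub","mul","xor","or","and"] : List String).contains first then "A"
    else if (["mov","rs","ls"] : List String).contains first
            && x.any (fun tok => PySem.Str.isIn "$" tok) then "B"
    else if (["mov","div","not","cmp"] : List String).contains first then "C"
    else if (["ld","st"] : List String).contains first then "D"
    else if (["jmp","jlt","jgt","je"] : List String).contains first then "E"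
    else if first == "hlt" then "F"
    else if PySem.Str.isIn ":" first then "label"
    else if first == "var" then "variable"
    else "none"

-- the while loop: strip leading tokens as long as the line classifies as a label
def stripLabels (line : List String) : List String :=
  if _h : instrType line = "label" then stripLabels (line.drop 1) else line
termination_by line.length
decreasing_by
  cases line with
  | nil => simp [instrType] at _h
  | cons a t => simp

def check_valid_variable_alt (line : List String) : Bool :=
  let l := stripLabels line
  instrType l == "variable" && 2 ≤ l.length && !(PySem.Str.strIsalnum (l.getD 1 ""))

-- ===== PRECONDITION & SPEC =====
def Spec_check_valid_variable (line : List String) (out : Bool) : Prop := out = check_valid_variable_alt line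
instance (line : List String) (out : Bool) : Decidable (Spec_check_valid_variable line out) := by unfold Spec_check_valid_variable; infer_instance

-- ===== CLAIM (what is proved, stated in full; the proofs are below) =====
def Claim_equal_check_valid_variable : Prop := ∀ (line : List String), Dom_check_valid_variable line → Spec_check_valid_variable line (check_valid_variable line)

-- ===== LEMMAS AND PROOFS =====

theorem singleton_infix_iff {α : Type} (a : α) (l : List α) : [a] <:+: l ↔ a ∈ l := by
  constructor
  · rintro ⟨s, t, rfl⟩; simp
  · intro h
    obtain ⟨s, t, rfl⟩ := List.append_of_mem h
    exact ⟨s, t, by simp⟩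

theorem dollar_fold_eq_any (x : List String) :
    PySem.Chars.isIn ['$'] (x.foldl (fun m i => m ++ i.toList) []) =
      x.any (fun tok => PySem.Str.isIn "$" tok) := by
  rw [PySem.List.foldl_append_eq_flatMap]
  simp only [List.nil_append]
  by_cases h : '$' ∈ x.flatMap String.toList
  · rw [show PySem.Chars.isIn ['$'] (x.flatMap String.toList) = true from
      (PySem.Chars.isIn_iff_infix _ _).mpr ((singleton_infix_iff _ _).mpr h)]
    obtain ⟨tok, htok, hc⟩ := List.mem_flatMap.mp h
    symm
    refine List.any_eq_true.mpr ⟨tok, htok, ?_⟩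
    exact (PySem.Str.isIn_iff_infix _ _).mpr ((singleton_infix_iff _ _).mpr hc)
  · rw [show PySem.Chars.isIn ['$'] (x.flatMap String.toList) = false from
      (PySem.Chars.isIn_eq_false_iff _ _).mpr (fun hi => h ((singleton_infix_iff _ _).mp hi))]
    symm
    refine List.any_eq_false.mpr (fun tok htok hi => ?_)
    exact h (List.mem_flatMap.mpr ⟨tok, htok,
      (singleton_infix_iff _ _).mp ((PySem.Str.isIn_iff_infix _ _).mp hi)⟩)

theorem contA (first : String) :
    type_A.contains first = (["add","sub","mul","xor","or","and"] : List String).contains first := by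
  simp only [type_A, PySem.Dict.contains, List.any_cons, List.any_nil, Bool.or_false]
  simp [beq_eq_decide, eq_comm]

theorem contB (first : String) :
    type_B.contains first = (["mov","rs","ls"] : List String).contains first := by
  simp only [type_B, PySem.Dict.contains, List.any_cons, List.any_nil, Bool.or_false]
  simp [beq_eq_decide, eq_comm]

theorem contC (first : String) :
    type_C.contains first = (["mov","div","not","cmp"] : List String).contains first := by
  simp only [type_C, PySem.Dict.contains, List.any_cons, List.any_nil, Bool.or_false]
  simp [beq_eq_decide, eq_comm]

theorem contD (first : String) :
    type_D.contains first = (["ld","st"] : List String).contains first := by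
  simp only [type_D, PySem.Dict.contains, List.any_cons, List.any_nil, Bool.or_false]
  simp [beq_eq_decide, eq_comm]

theorem contE (first : String) :
    type_E.contains first = (["jmp","jlt","jgt","je"] : List String).contains first := by
  simp only [type_E, PySem.Dict.contains, List.any_cons, List.any_nil, Bool.or_false]
  simp [beq_eq_decide, eq_comm]

theorem type_eq (x : List String) : check_type x = instrType x := by
  cases x with
  | nil => rfl
  | cons first rest =>
    simp only [check_type, instrType, dollar_fold_eq_any, contA, contB, contC, contD, contE]

theorem strip_label (line : List String) (h : instrType line = "label") :
    stripLabels line = stripLabels (line.drop 1) := by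
  conv_lhs => rw [stripLabels]
  rw [dif_pos h]

theorem strip_stop (line : List String) (h : instrType line ≠ "label") :
    stripLabels line = line := by
  rw [stripLabels, dif_neg h]

theorem eqv (line : List String) : check_valid_variable line = check_valid_variable_alt line := by
  rw [check_valid_variable]
  by_cases h : check_type line = "label"
  · rw [dif_pos h, eqv (line.drop 1)]
    unfold check_valid_variable_alt
    rw [strip_label line (by rw [← type_eq]; exact h)]
  · rw [dif_neg h]
    have h' : instrType line ≠ "label" := by rw [← type_eq]; exact h
    unfold check_valid_variable_alt
    rw [strip_stop line h', type_eq]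
    by_cases hv : instrType line = "variable"
    · rw [if_pos hv]
      simp only [hv, BEq.rfl, Bool.true_and]
      by_cases hl : 2 ≤ line.length
      · rw [if_pos hl]
        simp [hl]
      · rw [if_neg hl]
        simp [hl]
    · rw [if_neg hv]
      simp [hv]
termination_by line.length
decreasing_by
  cases line with
  | nil => simp [check_type] at h
  | cons a t => simp

-- ===== VERDICT (by name: the statement is the Claim_ definition above) =====
theorem check_valid_variable_spec : Claim_equal_check_valid_variable := by
  intro line _
  unfold Spec_check_valid_variable
  exact eqv line
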